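-- pv_equiv track=rewrite | github.com/colby72/taltech_labs | cryptography/assign1/breakVigenere.py | letterGroups
-- ===== SOURCE A (Python) =====
-- def letterGroups(cryptogram, n):
--     groups = []
--     for i in range(n):
--         group = []
--         for j in range(len(cryptogram)):
--             if j%n==i:
--                 group.append(cryptogram[j])
--         groups.append(group)
--     return groups
-- ===== SOURCE B (Python) =====
-- def letterGroups(cryptogram, n):
--     if n <= 0:
--         return []
--     groups = [[] for _ in range(n)]
--     for j, ch in enumerate(cryptogram):
--         groups[j % n].append(ch)
--     return groups
-- ===== Notes on version B (the rewrite author's own statement) =====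
-- stated objective: faster
-- what changed: Replaces the O(n*len) nested scan (one full pass over the whole string per group, with a j % n == i test) by a single pass over enumerate(cryptogram) that distributes each character into its bucket j % n.
import Mathlib
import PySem

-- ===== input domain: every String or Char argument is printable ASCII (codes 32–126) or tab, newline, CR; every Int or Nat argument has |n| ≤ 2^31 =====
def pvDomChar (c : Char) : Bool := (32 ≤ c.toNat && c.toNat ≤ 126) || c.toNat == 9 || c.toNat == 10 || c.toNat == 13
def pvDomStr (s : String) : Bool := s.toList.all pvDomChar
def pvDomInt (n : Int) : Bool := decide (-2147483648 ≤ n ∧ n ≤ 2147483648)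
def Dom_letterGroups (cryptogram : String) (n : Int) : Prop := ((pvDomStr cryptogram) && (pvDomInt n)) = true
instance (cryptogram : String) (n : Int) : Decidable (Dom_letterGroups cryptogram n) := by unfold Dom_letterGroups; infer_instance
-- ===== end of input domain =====

-- B replaces A's per-group rescans of the string by one bucket-distributing pass over enumerate(cryptogram); same output, proved equal.


-- ===== PORT A =====
-- cryptogram[j]: j ∈ range(len(cryptogram)) is always in range, so the `.getD ""` default is never used.
def letterGroups (cryptogram : String) (n : Int) : List (List String) :=
  (PySem.List.pyRange 0 n 1).foldl (fun groups i =>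
    groups ++ [(PySem.List.pyRange 0 (PySem.Str.len cryptogram) 1).foldl (fun group j =>
      if PySem.Int.mod j n == i then
        group ++ [((PySem.Str.pyGet? cryptogram j).map (fun ch => String.ofList [ch])).getD ""]
      else group) []]) []

-- ===== PORT B =====
-- groups[j % n]: with n > 0, j % n ∈ [0, n), so the Nat index (mod p.1 n).toNat is exact.
def letterGroups_alt (cryptogram : String) (n : Int) : List (List String) :=
  if n ≤ 0 then []
  else
    (PySem.List.enumerate cryptogram.toList 0).foldl
      (fun groups p =>
        let k := (PySem.Int.mod p.1 n).toNat
        groups.set k ((groups.getD k []) ++ [String.ofList [p.2]]))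
      (List.replicate n.toNat [])

-- ===== PRECONDITION & SPEC =====
def Spec_letterGroups (cryptogram : String) (n : Int) (out : List (List String)) : Prop := out = letterGroups_alt cryptogram n
instance (cryptogram : String) (n : Int) (out : List (List String)) : Decidable (Spec_letterGroups cryptogram n out) := by unfold Spec_letterGroups; infer_instance

-- ===== CLAIM (what is proved, stated in full; the proofs are below) =====
def Claim_equal_letterGroups : Prop := ∀ (cryptogram : String) (n : Int), Dom_letterGroups cryptogram n → Spec_letterGroups cryptogram n (letterGroups cryptogram n)

-- ===== LEMMAS AND PROOFS =====

-- Group i of A, in filter/map form, over the character list.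
def aInner (cs : List Char) (n i : Int) : List String :=
  ((PySem.List.pyRange 0 (cs.length : Int) 1).filter (fun j => PySem.Int.mod j n == i)).map
    (fun j => ((PySem.List.pyGet? cs j).map (fun ch => String.ofList [ch])).getD "")

lemma letterGroups_eq_map (cryptogram : String) (n : Int) :
    letterGroups cryptogram n = (PySem.List.pyRange 0 n 1).map (fun i => aInner cryptogram.toList n i) := by
  simp only [letterGroups, aInner, PySem.List.foldl_append_singleton_eq_map,
    PySem.List.foldl_append_if, PySem.Str.len_eq, PySem.Str.pyGet?, PySem.Chars.pyGet?,
    List.nil_append]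

lemma aInner_nil (n i : Int) : aInner [] n i = [] := by
  simp [aInner, PySem.List.pyRange_one_eq_nil]

lemma aInner_append (cs : List Char) (ch : Char) (n i : Int) :
    aInner (cs ++ [ch]) n i
      = aInner cs n i ++ (if PySem.Int.mod (cs.length : Int) n == i then [String.ofList [ch]] else []) := by
  unfold aInner
  have h1 : (((cs ++ [ch]).length : Int)) = (cs.length : Int) + 1 := by simp
  rw [h1, PySem.List.pyRange_one_succ_right (by positivity), List.filter_append, List.map_append]
  congr 1
  · apply List.map_congr_left
    intro j hj
    have hj' := PySem.List.mem_pyRange_one.1 (List.mem_filter.1 hj).1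
    rw [PySem.List.pyGet?_of_nonneg _ hj'.1, PySem.List.pyGet?_of_nonneg _ hj'.1,
      List.getElem?_append_left (by omega : j.toNat < cs.length)]
  · by_cases hmod : PySem.Int.mod (cs.length : Int) n == i
    · simp only [List.filter_singleton, hmod, cond_true, List.map,
        PySem.List.pyGet?_append_length]
      simp
    · simp [hmod]

lemma bucket_fold (m : Nat) (hm : 0 < m) (cs : List Char) :
    (PySem.List.enumerate cs 0).foldl
      (fun (groups : List (List String)) p =>
        groups.set (PySem.Int.mod p.1 (m : Int)).toNat
          ((groups.getD (PySem.Int.mod p.1 (m : Int)).toNat []) ++ [String.ofList [p.2]]))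
      (List.replicate m [])
    = (List.range m).map (fun (i : Nat) => aInner cs (m : Int) (i : Int)) := by
  induction cs using List.reverseRecOn with
  | nil =>
      simp [PySem.List.enumerate_nil, aInner_nil]
  | append_singleton cs ch ih =>
      rw [PySem.List.enumerate_append, List.foldl_append, ih]
      have hk : (PySem.Int.mod ((0 : Int) + (cs.length : Int)) (m : Int)).toNat = cs.length % m := by
        rw [zero_add]
        rw [show (PySem.Int.mod (cs.length : Int) (m : Int)) = ((cs.length % m : Nat) : Int) from
          PySem.Int.mod_natCast cs.length m]
        exact Int.toNat_natCast _
      have hkm : cs.length % m < m := Nat.mod_lt _ hm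
      simp only [PySem.List.enumerate_cons, PySem.List.enumerate_nil, List.foldl_cons,
        List.foldl_nil, hk]
      have hget : (List.map (fun (i : Nat) => aInner cs (m : Int) (i : Int)) (List.range m)).getD
            (cs.length % m) []
          = aInner cs (m : Int) ((cs.length % m : Nat) : Int) := by
        rw [List.getD_eq_getElem?_getD, List.getElem?_map, List.getElem?_range hkm]
        rfl
      rw [hget]
      apply List.ext_getElem
      · simp
      · intro i h1 h2
        rw [List.getElem_set]
        simp only [List.getElem_map, List.getElem_range]
        have him : i < m := by simpa using h2
        rw [aInner_append]
        by_cases hi : cs.length % m = i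
        · subst hi
          have : (PySem.Int.mod (cs.length : Int) (m : Int) == ((cs.length % m : Nat) : Int)) = true := by
            rw [PySem.Int.mod_natCast]; simp
          rw [this]
          simp
        · rw [if_neg hi]
          have : (PySem.Int.mod (cs.length : Int) (m : Int) == ((i : Nat) : Int)) = false := by
            rw [PySem.Int.mod_natCast]
            simp only [beq_eq_false_iff_ne, ne_eq, Int.natCast_inj]
            exact hi
          rw [this]
          simp

-- ===== VERDICT (by name: the statement is the Claim_ definition above) =====
theorem letterGroups_spec : Claim_equal_letterGroups := by
  intro cryptogram n _
  unfold Spec_letterGroups letterGroups_alt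
  by_cases hn : n ≤ 0
  · simp only [hn, if_true]
    rw [letterGroups_eq_map, PySem.List.pyRange_one_eq_nil hn]
    rfl
  · rw [not_le] at hn
    simp only [not_le.mpr hn, if_false]
    have hm : 0 < n.toNat := by omega
    have hcast : ((n.toNat : Int)) = n := Int.toNat_of_nonneg hn.le
    rw [letterGroups_eq_map]
    rw [show n = ((n.toNat : Int)) from hcast.symm]
    simp only [Int.toNat_natCast]
    rw [bucket_fold n.toNat hm]
    rw [PySem.List.pyRange_one (0 : Int) (n.toNat : Int)]
    simp only [List.map_map, sub_zero, Int.toNat_natCast]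
    exact List.map_congr_left (fun k _ => by simp [Function.comp])
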